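-- pv_equiv track=rewrite | github.com/TheDavibob/AOC2021 | 2023/day18.py | draw_edge
-- ===== SOURCE A (Python) =====
-- def draw_edge(input):
--     current_point = (0, 0)
--     all_points = []
--     all_segments = []
--
--     all_points.append(current_point)
--
--     for direction, length, colour in input:
--         if direction == "R":
--             current_point = current_point[0], current_point[1] + length
--         elif direction == "L":
--             current_point = current_point[0], current_point[1] - length
--         elif direction == "U":
--             current_point = current_point[0] - length, current_point[1]
--         elif direction == "D":
--             current_point = current_point[0] + length, current_point[1]
--         else:
--             raise ValueError(f"Direction {direction} not understood")
--
--         all_points.append(current_point)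
--         all_segments.append(colour)
--
--     return all_points, all_segments
-- ===== SOURCE B (Python) =====
-- def _step(direction, length):
--     if direction == "R":
--         return (0, length)
--     elif direction == "L":
--         return (0, -length)
--     elif direction == "U":
--         return (-length, 0)
--     elif direction == "D":
--         return (length, 0)
--     raise ValueError(f"Direction {direction} not understood")
--
--
-- def _path(instrs):
--     # divide & conquer: a path for each half from the origin, then translate
--     # the second half's path by the first half's endpoint and splice
--     if not instrs:
--         return [(0, 0)], []
--     if len(instrs) == 1:
--         direction, length, colour = instrs[0]
--         return [(0, 0), _step(direction, length)], [colour]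
--     mid = len(instrs) // 2
--     p1, c1 = _path(instrs[:mid])
--     p2, c2 = _path(instrs[mid:])
--     r0, c0 = p1[-1]
--     return p1 + [(r0 + r, c0 + c) for r, c in p2[1:]], c1 + c2
--
--
-- def draw_edge(input):
--     return _path(input)
-- ===== Notes on version B (the rewrite author's own statement) =====
-- stated objective: alternative
-- what changed: A's single fused loop (branch chain updating current_point while appending points and colours) is replaced by a divide-and-conquer algorithm: recursively draw each half of the instruction list as a path from the origin, then translate the second half's path by the first half's endpoint and splice the two paths and colour lists.
import Mathlib
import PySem

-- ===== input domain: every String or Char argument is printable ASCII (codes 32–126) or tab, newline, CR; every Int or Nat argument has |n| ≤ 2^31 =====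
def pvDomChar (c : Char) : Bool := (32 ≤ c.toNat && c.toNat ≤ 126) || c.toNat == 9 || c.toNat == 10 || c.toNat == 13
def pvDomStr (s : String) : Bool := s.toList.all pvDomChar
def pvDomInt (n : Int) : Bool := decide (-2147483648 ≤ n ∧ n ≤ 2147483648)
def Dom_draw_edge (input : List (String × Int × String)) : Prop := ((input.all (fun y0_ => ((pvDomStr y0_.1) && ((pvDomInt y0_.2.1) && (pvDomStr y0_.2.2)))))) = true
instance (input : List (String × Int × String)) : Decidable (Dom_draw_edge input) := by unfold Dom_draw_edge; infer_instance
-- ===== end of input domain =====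

-- B replaces A's single fused accumulation loop with a divide-and-conquer algorithm:
-- draw each half of the instruction list from the origin, translate the second half's
-- path by the first half's endpoint and splice (objective: alternative).

-- ===== PORT A =====
-- A's for-loop over (direction, length, colour), carrying current_point, all_points, all_segments.
-- In the final 'else' Python raises ValueError (excluded by Pre_); the port keeps current_point there.
def drawEdgeLoop : List (String × Int × String) → (Int × Int) → List (Int × Int) → List String → (List (Int × Int)) × List String
  | [], _, allPoints, allSegments => (allPoints, allSegments)
  | (direction, length, colour) :: rest, cur, allPoints, allSegments =>
    let cur' :=
      if direction = "R" then (cur.1, cur.2 + length)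
      else if direction = "L" then (cur.1, cur.2 - length)
      else if direction = "U" then (cur.1 - length, cur.2)
      else if direction = "D" then (cur.1 + length, cur.2)
      else cur  -- Python: raise ValueError (outside Pre_)
    drawEdgeLoop rest cur' (allPoints ++ [cur']) (allSegments ++ [colour])

def draw_edge (input : List (String × Int × String)) : (List (Int × Int)) × List String :=
  drawEdgeLoop input (0, 0) [(0, 0)] []

-- ===== PORT B =====
-- _step: unit move scaled by length; on an unknown direction Python raises ValueError (outside Pre_).
def pvStep (direction : String) (length : Int) : Int × Int :=
  if direction = "R" then (0, length)
  else if direction = "L" then (0, -length)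
  else if direction = "U" then (-length, 0)
  else if direction = "D" then (length, 0)
  else (0, 0)  -- Python: raise ValueError (outside Pre_)

-- _path: divide and conquer. instrs[:mid]/instrs[mid:] → take/drop (exact: 0 ≤ mid ≤ len);
-- p1[-1] → getLastD (p1 is never empty); p2[1:] → drop 1.
def pvPath : List (String × Int × String) → (List (Int × Int)) × List String
  | [] => ([(0, 0)], [])
  | [t] => ([(0, 0), pvStep t.1 t.2.1], [t.2.2])
  | a :: b :: rest =>
    let mid := (a :: b :: rest).length / 2
    let r1 := pvPath ((a :: b :: rest).take mid)
    let r2 := pvPath ((a :: b :: rest).drop mid)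
    let e := r1.1.getLastD (0, 0)
    (r1.1 ++ (r2.1.drop 1).map (fun q => (e.1 + q.1, e.2 + q.2)), r1.2 ++ r2.2)
termination_by l => l.length
decreasing_by
  · simp [List.length_take]; omega
  · simp [List.length_drop]; omega

def draw_edge_alt (input : List (String × Int × String)) : (List (Int × Int)) × List String :=
  pvPath input

-- ===== PRECONDITION & SPEC =====
-- Pre_: every direction is one of R/L/U/D — on any other direction the Python A raises ValueError.
def Pre_draw_edge (input : List (String × Int × String)) : Prop :=
  ∀ t ∈ input, t.1 = "R" ∨ t.1 = "L" ∨ t.1 = "U" ∨ t.1 = "D"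
instance (input : List (String × Int × String)) : Decidable (Pre_draw_edge input) := by
  unfold Pre_draw_edge; infer_instance

def pvWitness_draw_edge : (List (String × Int × String)) := [("R", 2, "#70c710"), ("D", 3, "#0dc571")]

def Spec_draw_edge (input : List (String × Int × String)) (out : (List (Int × Int)) × List String) : Prop := out = draw_edge_alt input
instance (input : List (String × Int × String)) (out : (List (Int × Int)) × List String) : Decidable (Spec_draw_edge input out) := by unfold Spec_draw_edge; infer_instance

-- ===== CLAIM (what is proved, stated in full; the proofs are below) =====
def Claim_equal_draw_edge : Prop := ∀ (input : List (String × Int × String)), Dom_draw_edge input → Pre_draw_edge input → Spec_draw_edge input (draw_edge input)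

-- ===== LEMMAS AND PROOFS =====

-- abstract path from a start point: pvS p l = the polyline starting at p following l
def pvS (p : Int × Int) : List (String × Int × String) → List (Int × Int)
  | [] => [p]
  | t :: r => p :: pvS (p.1 + (pvStep t.1 t.2.1).1, p.2 + (pvStep t.1 t.2.1).2) r

lemma pvS_head (p : Int × Int) (l : List (String × Int × String)) :
    pvS p l = p :: (pvS p l).drop 1 := by
  cases l <;> simp [pvS]

-- A's if-chain step equals adding B's step vector (in the unknown-direction case both keep cur).
lemma step_eq (d : String) (len : Int) (cur : Int × Int) :
    (if d = "R" then (cur.1, cur.2 + len)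
     else if d = "L" then (cur.1, cur.2 - len)
     else if d = "U" then (cur.1 - len, cur.2)
     else if d = "D" then (cur.1 + len, cur.2)
     else cur)
    = (cur.1 + (pvStep d len).1, cur.2 + (pvStep d len).2) := by
  unfold pvStep
  split_ifs <;> simp [sub_eq_add_neg]

-- A's loop appends exactly the tail of the abstract path
lemma loop_eq_pvS (l : List (String × Int × String)) :
    ∀ (cur : Int × Int) (pts : List (Int × Int)) (segs : List String),
      drawEdgeLoop l cur pts segs = (pts ++ (pvS cur l).drop 1, segs ++ l.map (fun t => t.2.2)) := by
  induction l with
  | nil => intro cur pts segs; simp [drawEdgeLoop, pvS]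
  | cons hd tl ih =>
    rcases hd with ⟨d, len, c⟩
    intro cur pts segs
    simp only [drawEdgeLoop]
    rw [step_eq d len cur, ih]
    rw [show pvS cur ((d, len, c) :: tl) = cur :: pvS (cur.1 + (pvStep d len).1, cur.2 + (pvStep d len).2) tl from rfl]
    rw [pvS_head (cur.1 + (pvStep d len).1, cur.2 + (pvStep d len).2) tl]
    simp

lemma pvS_getLastD (p : Int × Int) (l : List (String × Int × String)) (z : Int × Int) :
    (pvS p l).getLastD z = l.foldl (fun q t => (q.1 + (pvStep t.1 t.2.1).1, q.2 + (pvStep t.1 t.2.1).2)) p := by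
  induction l generalizing p z with
  | nil => simp [pvS]
  | cons t r ih =>
    simp only [pvS, List.foldl_cons]
    rw [List.getLastD_cons, ih]

lemma pvS_translate (a p : Int × Int) (l : List (String × Int × String)) :
    (pvS p l).map (fun q => (a.1 + q.1, a.2 + q.2)) = pvS (a.1 + p.1, a.2 + p.2) l := by
  induction l generalizing p with
  | nil => simp [pvS]
  | cons t r ih =>
    simp only [pvS, List.map_cons]
    rw [ih]
    ring_nf

lemma pvS_append (p : Int × Int) (l1 l2 : List (String × Int × String)) :
    pvS p (l1 ++ l2)
      = pvS p l1 ++ (pvS (l1.foldl (fun q t => (q.1 + (pvStep t.1 t.2.1).1, q.2 + (pvStep t.1 t.2.1).2)) p) l2).drop 1 := by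
  induction l1 generalizing p with
  | nil =>
    simp only [List.nil_append, List.foldl_nil, pvS]
    exact pvS_head p l2
  | cons t r ih =>
    simp only [List.cons_append, pvS, List.foldl_cons, List.cons_append]
    rw [ih]

-- characterization of the divide-and-conquer: pvPath l = (pvS (0,0) l, colours of l)
lemma pvPath_eq_aux (n : Nat) :
    ∀ l : List (String × Int × String), l.length ≤ n →
      pvPath l = (pvS (0, 0) l, l.map (fun t => t.2.2)) := by
  induction n with
  | zero =>
    intro l hl
    have : l = [] := List.eq_nil_of_length_eq_zero (Nat.le_zero.mp hl)
    subst this; simp [pvPath, pvS]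
  | succ n ih =>
    intro l hl
    match l with
    | [] => simp [pvPath, pvS]
    | [t] => simp [pvPath, pvS]
    | a :: b :: rest =>
      rw [pvPath]
      rw [ih (List.take ((a :: b :: rest).length / 2) (a :: b :: rest))
            (by simp only [List.length_take, List.length_cons] at hl ⊢; omega),
          ih (List.drop ((a :: b :: rest).length / 2) (a :: b :: rest))
            (by simp only [List.length_drop, List.length_cons] at hl ⊢; omega)]
      have hsplit := List.take_append_drop ((a :: b :: rest).length / 2) (a :: b :: rest)
      simp only [Prod.mk.injEq]
      constructor
      · have happ := pvS_append (0, 0) (List.take ((a :: b :: rest).length / 2) (a :: b :: rest))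
          (List.drop ((a :: b :: rest).length / 2) (a :: b :: rest))
        rw [hsplit] at happ
        rw [happ, pvS_getLastD _ _ (0, 0), List.map_drop, pvS_translate]
        simp
      · rw [← List.map_append, hsplit]

lemma pvPath_eq (l : List (String × Int × String)) :
    pvPath l = (pvS (0, 0) l, l.map (fun t => t.2.2)) :=
  pvPath_eq_aux l.length l le_rfl

-- ===== VERDICT (by name: the statement is the Claim_ definition above) =====
theorem draw_edge_spec : Claim_equal_draw_edge := by
  intro input _ _
  show draw_edge input = draw_edge_alt input
  unfold draw_edge draw_edge_alt
  rw [loop_eq_pvS input (0, 0) [(0, 0)] [], pvPath_eq]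
  rw [pvS_head (0, 0) input]
  simp
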